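-- pv_equiv track=rewrite | github.com/s-eun-young-g/intro-programming-and-algos-archive | 6.1010/recipes/recipes_lab.py | combine_recipes
-- ===== SOURCE A (Python) =====
-- def add_recipes(recipe_dicts):
--     """
--     Given a list of recipe dictionaries that map food items to quantities,
--     return a new dictionary that maps each ingredient name
--     to the sum of its quantities across the given recipe dictionaries.
--
--     For example,
--         add_recipes([{'milk':1, 'chocolate':1}, {'sugar':1, 'milk':2}])
--     should return:
--         {'milk':3, 'chocolate': 1, 'sugar': 1}
--
--     Arguments:
--     A list of recipe dictionaries
--
--     Returns:
--     A single recipe dictionary that has combined all input recipes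
--     (including adding same ingredients in different recipes together)
--     """
--     added_recipes = {}
--     for recipe in recipe_dicts:  # iterate through recipes in list
--         for item in recipe:
--             if item not in added_recipes:  # create entry for each food item
--                 added_recipes[item] = recipe[item]
--             else:
--                 added_recipes[item] += recipe[item]  # update quantity
--     return added_recipes
--
-- def combine_recipes(nested_recipes):
--     """
--     Given a list of lists of recipe dictionaries, where each inner list
--     represents all the recipes for a certain ingredient, compute and return a
--     list of recipe dictionaries that represent all the possible combinations of
--     ingredient recipes.
--
--     Arguments:
--     A list of lists of recipe dictionaries
--
--     Returns:
--     A list of recipe dictionaries containing all combinations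
--     of recipes for each (nested) ingredient
--     """
--     # initialize the list to hold the combined recipes
--     combined_recipes = []
--
--     # check edge case
--     if not nested_recipes:
--         return []
--
--     # helper function to generate all combinations
--     def recursive_combinations(index, current_recipe):
--         # base case
--         # if index = length, means all ingredients have been iterated through
--         if index == len(nested_recipes):
--             combined_recipes.append(current_recipe)
--         else:
--             # iterate over each recipe in that exist for the current ingredient
--             for recipe in nested_recipes[index]:
--                 new_recipe = add_recipes(
--                     [current_recipe, recipe]
--                 )  # call helper function
--                 # recursive call for next index
--                 recursive_combinations(index + 1, new_recipe)
--
--     recursive_combinations(0, {})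
--
--     return combined_recipes
-- ===== SOURCE B (Python) =====
-- def add_recipes(recipe_dicts):
--     added_recipes = {}
--     for recipe in recipe_dicts:
--         for item in recipe:
--             if item not in added_recipes:
--                 added_recipes[item] = recipe[item]
--             else:
--                 added_recipes[item] += recipe[item]
--     return added_recipes
--
--
-- def combine_recipes(nested_recipes):
--     if not nested_recipes:
--         return []
--     combined = [{}]
--     for group in nested_recipes:
--         combined = [
--             add_recipes([partial, recipe])
--             for partial in combined
--             for recipe in group
--         ]
--     return combined
-- ===== Notes on version B (the rewrite author's own statement) =====
-- stated objective: idiomatic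
-- what changed: Replaced the index-based recursive closure appending to an outer accumulator by an iterative Cartesian-product build: seed [{}] and rebuild the list of partial combinations with a comprehension per ingredient group.
import Mathlib
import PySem

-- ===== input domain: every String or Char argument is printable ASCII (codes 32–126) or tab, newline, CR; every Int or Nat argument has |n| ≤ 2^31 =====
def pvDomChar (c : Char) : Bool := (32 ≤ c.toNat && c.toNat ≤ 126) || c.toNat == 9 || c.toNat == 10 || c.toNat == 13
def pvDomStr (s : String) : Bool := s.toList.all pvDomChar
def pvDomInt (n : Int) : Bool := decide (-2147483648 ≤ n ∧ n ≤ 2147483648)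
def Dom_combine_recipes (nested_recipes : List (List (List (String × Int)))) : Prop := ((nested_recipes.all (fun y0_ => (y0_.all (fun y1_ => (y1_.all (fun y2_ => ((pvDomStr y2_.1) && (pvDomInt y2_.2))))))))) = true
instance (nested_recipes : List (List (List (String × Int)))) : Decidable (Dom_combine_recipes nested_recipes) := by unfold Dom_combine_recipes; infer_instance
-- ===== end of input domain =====

-- B replaces A's index-based recursive closure by an iterative Cartesian-product build (idiomatic decomposition; same cost).


-- ===== PORT A =====
-- shared module helper add_recipes: merge a list of dicts, summing quantities
def add_recipes (recipe_dicts : List (PySem.Dict String Int)) : PySem.Dict String Int :=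
  recipe_dicts.foldl (fun added recipe =>
    recipe.items.foldl (fun added kv =>
      if added.contains kv.1 = false then added.insert kv.1 kv.2
      else added.insert kv.1 (added.getD kv.1 0 + kv.2)) added) PySem.Dict.empty

-- recursive_combinations: recursion over the remaining suffix of groups; the outer
-- accumulator list combined_recipes is modelled by returning the appended results in order
def combine_recipes_rec (gs : List (List (PySem.Dict String Int))) (current : PySem.Dict String Int) :
    List (PySem.Dict String Int) :=
  match gs with
  | [] => [current]
  | g :: rest => g.foldl (fun acc recipe => acc ++ combine_recipes_rec rest (add_recipes [current, recipe])) []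

def combine_recipes (nested_recipes : List (List (List (String × Int)))) : List (List (String × Int)) :=
  if nested_recipes = [] then []
  else
    (combine_recipes_rec (nested_recipes.map (fun g => g.map PySem.Dict.ofList)) PySem.Dict.empty).map
      (fun d => d.items)

-- ===== PORT B =====
def combine_recipes_alt (nested_recipes : List (List (List (String × Int)))) : List (List (String × Int)) :=
  if nested_recipes = [] then []
  else
    ((nested_recipes.map (fun g => g.map PySem.Dict.ofList)).foldl
        (fun combined group => combined.flatMap (fun partial_ => group.map (fun recipe => add_recipes [partial_, recipe])))
        [PySem.Dict.empty]).map (fun d => d.items)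

-- ===== PRECONDITION & SPEC =====
def Spec_combine_recipes (nested_recipes : List (List (List (String × Int)))) (out : List (List (String × Int))) : Prop := out = combine_recipes_alt nested_recipes
instance (nested_recipes : List (List (List (String × Int)))) (out : List (List (String × Int))) : Decidable (Spec_combine_recipes nested_recipes out) := by unfold Spec_combine_recipes; infer_instance

-- ===== CLAIM (what is proved, stated in full; the proofs are below) =====
def Claim_equal_combine_recipes : Prop := ∀ (nested_recipes : List (List (List (String × Int)))), Dom_combine_recipes nested_recipes → Spec_combine_recipes nested_recipes (combine_recipes nested_recipes)

-- ===== LEMMAS AND PROOFS =====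

-- B's loop step
def prodStep (combined : List (PySem.Dict String Int)) (group : List (PySem.Dict String Int)) :
    List (PySem.Dict String Int) :=
  combined.flatMap (fun partial_ => group.map (fun recipe => add_recipes [partial_, recipe]))

theorem foldl_prodStep_nil (gs : List (List (PySem.Dict String Int))) :
    gs.foldl prodStep [] = [] := by
  induction gs with
  | nil => rfl
  | cons g rest ih => simpa [prodStep] using ih

theorem foldl_prodStep_append (gs : List (List (PySem.Dict String Int)))
    (c1 c2 : List (PySem.Dict String Int)) :
    gs.foldl prodStep (c1 ++ c2) = gs.foldl prodStep c1 ++ gs.foldl prodStep c2 := by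
  induction gs generalizing c1 c2 with
  | nil => rfl
  | cons g rest ih =>
      simp only [List.foldl_cons]
      rw [show prodStep (c1 ++ c2) g = prodStep c1 g ++ prodStep c2 g by
            simp [prodStep, List.flatMap_append]]
      exact ih _ _

theorem foldl_prodStep_map (rest : List (List (PySem.Dict String Int)))
    (xs : List (PySem.Dict String Int)) (f : PySem.Dict String Int → PySem.Dict String Int) :
    rest.foldl prodStep (xs.map f) = xs.flatMap (fun x => rest.foldl prodStep [f x]) := by
  induction xs with
  | nil => simp [foldl_prodStep_nil]
  | cons x xs ih =>
      rw [List.map_cons,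
          show (f x :: xs.map f) = [f x] ++ xs.map f from rfl,
          foldl_prodStep_append, ih, List.flatMap_cons]

theorem rec_eq_foldl (gs : List (List (PySem.Dict String Int))) (current : PySem.Dict String Int) :
    combine_recipes_rec gs current = gs.foldl prodStep [current] := by
  induction gs generalizing current with
  | nil => rfl
  | cons g rest ih =>
      simp only [combine_recipes_rec, List.foldl_cons]
      rw [PySem.List.foldl_append_eq_flatMap, List.nil_append,
          show prodStep [current] g = g.map (fun r => add_recipes [current, r]) by simp [prodStep],
          foldl_prodStep_map]
      exact List.flatMap_congr (fun r _ => ih _)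

-- ===== VERDICT (by name: the statement is the Claim_ definition above) =====
theorem combine_recipes_spec : Claim_equal_combine_recipes := by
  intro nr _
  unfold Spec_combine_recipes combine_recipes combine_recipes_alt
  by_cases h : nr = []
  · simp [h]
  · simp only [h, rec_eq_foldl]
    rfl
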